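-- pv_equiv track=rewrite | github.com/lokengd/spade | src/utils/snippet_extractor2.py | get_all_docstring_indices
-- ===== SOURCE A (Python) =====
-- from typing import Union, List, Tuple, Optional, Set, Dict
--
-- def get_docstring_range(lines: List[str], func_idx: int) -> Optional[Tuple[int, int]]:
--     """Finds the range of the docstring for a function/class."""
--     idx = func_idx + 1
--     while idx < len(lines) and not lines[idx].strip():
--         idx += 1
--
--     if idx >= len(lines):
--         return None
--
--     stripped = lines[idx].strip()
--     if stripped.startswith('"""') or stripped.startswith("'''"):
--         quote_char = stripped[:3]
--         start_doc = idx
--         if stripped.count(quote_char) >= 2 and len(stripped) >= 6: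
--             return start_doc, idx + 1
--         idx += 1
--         while idx < len(lines):
--             if quote_char in lines[idx]:
--                 return start_doc, idx + 1
--             idx += 1
--     return None
--
-- def get_all_docstring_indices(lines: List[str]) -> Set[int]:
--     """Detects all docstring line indices in the file."""
--     doc_indices = set()
--     for i, line in enumerate(lines):
--         if line.lstrip().startswith(("def ", "class ")):
--             d_range = get_docstring_range(lines, i)
--             if d_range:
--                 for idx in range(d_range[0], d_range[1]):
--                     doc_indices.add(idx)
--     return doc_indices
-- ===== SOURCE B (Python) =====
-- def get_all_docstring_indices(lines):
--     """Detects all docstring line indices in the file (one-pass precomputation)."""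
--     n = len(lines)
--     # next_nonblank[p]: smallest q >= p with lines[q].strip() truthy, else n
--     next_nonblank = [n] * (n + 1)
--     for p in range(n - 1, -1, -1):
--         next_nonblank[p] = p if lines[p].strip() else next_nonblank[p + 1]
--     # next_q3/next_q1[p]: smallest q >= p whose line contains the quote, else n
--     next_q3 = [n] * (n + 1)
--     next_q1 = [n] * (n + 1)
--     for p in range(n - 1, -1, -1):
--         next_q3[p] = p if '"""' in lines[p] else next_q3[p + 1]
--         next_q1[p] = p if "'''" in lines[p] else next_q1[p + 1]
--     doc_indices = set()
--     for i, line in enumerate(lines):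
--         if line.lstrip().startswith(("def ", "class ")):
--             j = next_nonblank[i + 1]
--             if j < n:
--                 stripped = lines[j].strip()
--                 if stripped.startswith('"""') or stripped.startswith("'''"):
--                     quote = stripped[:3]
--                     if stripped.count(quote) >= 2 and len(stripped) >= 6:
--                         doc_indices.update(range(j, j + 1))
--                     else:
--                         k = (next_q3 if stripped.startswith('"""') else next_q1)[j + 1]
--                         if k < n:
--                             doc_indices.update(range(j, k + 1))
--     return doc_indices
-- ===== Notes on version B (the rewrite author's own statement) =====
-- stated objective: alternative
-- what changed: B replaces A's per-def forward scans (skip-blanks loop and closing-quote search inside get_docstring_range) with next-non-blank and next-quote-occurrence arrays precomputed in one backward pass, so each def/class line is resolved by O(1) array lookups.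
import Mathlib
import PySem

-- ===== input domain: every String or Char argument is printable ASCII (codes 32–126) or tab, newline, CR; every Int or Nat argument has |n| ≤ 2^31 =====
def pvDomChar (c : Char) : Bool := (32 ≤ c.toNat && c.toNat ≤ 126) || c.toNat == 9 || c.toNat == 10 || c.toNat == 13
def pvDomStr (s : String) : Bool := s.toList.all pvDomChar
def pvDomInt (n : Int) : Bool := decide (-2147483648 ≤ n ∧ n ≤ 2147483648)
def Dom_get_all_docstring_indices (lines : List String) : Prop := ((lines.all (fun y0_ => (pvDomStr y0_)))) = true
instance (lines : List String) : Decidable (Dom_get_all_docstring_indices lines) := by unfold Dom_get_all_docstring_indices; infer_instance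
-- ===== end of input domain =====

-- B replaces A's per-def forward scans with next-non-blank / next-quote arrays built in one
-- backward pass (objective: alternative algorithm; return value only — neither mutates its input).

-- ===== PORT A =====
-- while idx < len(lines) and not lines[idx].strip(): idx += 1
def pvSkipBlank (lines : List String) (idx : Nat) : Nat :=
  if h : idx < lines.length then
    if (PySem.Str.strip lines[idx]).toList = [] then pvSkipBlank lines (idx + 1) else idx
  else idx
termination_by lines.length - idx
decreasing_by omega

-- while idx < len(lines): if quote_char in lines[idx]: return …; idx += 1
def pvFindQuote (lines : List String) (q : String) (idx : Nat) : Option Nat :=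
  if h : idx < lines.length then
    if PySem.Str.isIn q lines[idx] then some idx else pvFindQuote lines q (idx + 1)
  else none
termination_by lines.length - idx
decreasing_by omega

def pvGetDocstringRange (lines : List String) (func_idx : Nat) : Option (Nat × Nat) :=
  let idx := pvSkipBlank lines (func_idx + 1)
  if idx ≥ lines.length then none
  else
    let stripped := PySem.Str.strip (lines.getD idx "")
    if PySem.Str.startswith stripped "\"\"\"" || PySem.Str.startswith stripped "'''" then
      let quote := PySem.Str.slice stripped none (some 3)
      if PySem.Str.count stripped quote ≥ 2 ∧ PySem.Str.len stripped ≥ 6 then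
        some (idx, idx + 1)
      else
        match pvFindQuote lines quote (idx + 1) with
        | some j => some (idx, j + 1)
        | none => none
    else none

def get_all_docstring_indices (lines : List String) : List Int :=
  (PySem.List.enumerate lines 0).foldl
    (fun doc_indices p =>
      if PySem.Str.startswith (PySem.Str.lstrip p.2) "def " ||
         PySem.Str.startswith (PySem.Str.lstrip p.2) "class " then
        match pvGetDocstringRange lines p.1.toNat with
        | some d => (PySem.List.pyRange (d.1 : Int) (d.2 : Int) 1).foldl PySem.Set.add doc_indices
        | none => doc_indices
      else doc_indices)
    PySem.Set.empty

-- ===== PORT B =====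
-- next_nonblank array, filled back-to-front: entry p = p if lines[p].strip() else entry (p+1)
def pvNextNonblank : List String → Nat → List Nat
  | [], p => [p]
  | l :: rest, p =>
    let t := pvNextNonblank rest (p + 1)
    (if (PySem.Str.strip l).toList ≠ [] then p else t.headD (p + 1)) :: t

-- next-quote-occurrence array for quote string q, filled back-to-front
def pvNextQuote (q : String) : List String → Nat → List Nat
  | [], p => [p]
  | l :: rest, p =>
    let t := pvNextQuote q rest (p + 1)
    (if PySem.Str.isIn q l then p else t.headD (p + 1)) :: t

def get_all_docstring_indices_alt (lines : List String) : List Int :=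
  let n := lines.length
  let nnb := pvNextNonblank lines 0
  let nq3 := pvNextQuote "\"\"\"" lines 0
  let nq1 := pvNextQuote "'''" lines 0
  (PySem.List.enumerate lines 0).foldl
    (fun doc_indices p =>
      if PySem.Str.startswith (PySem.Str.lstrip p.2) "def " ||
         PySem.Str.startswith (PySem.Str.lstrip p.2) "class " then
        let j := nnb.getD (p.1.toNat + 1) n
        if j < n then
          let stripped := PySem.Str.strip (lines.getD j "")
          if PySem.Str.startswith stripped "\"\"\"" || PySem.Str.startswith stripped "'''" then
            let quote := PySem.Str.slice stripped none (some 3)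
            if PySem.Str.count stripped quote ≥ 2 ∧ PySem.Str.len stripped ≥ 6 then
              (PySem.List.pyRange (j : Int) ((j : Int) + 1) 1).foldl PySem.Set.add doc_indices
            else
              let k := (if PySem.Str.startswith stripped "\"\"\"" then nq3 else nq1).getD (j + 1) n
              if k < n then
                (PySem.List.pyRange (j : Int) ((k : Int) + 1) 1).foldl PySem.Set.add doc_indices
              else doc_indices
          else doc_indices
        else doc_indices
      else doc_indices)
    PySem.Set.empty

-- ===== PRECONDITION & SPEC =====
def Spec_get_all_docstring_indices (lines : List String) (out : List Int) : Prop := out = get_all_docstring_indices_alt lines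
instance (lines : List String) (out : List Int) : Decidable (Spec_get_all_docstring_indices lines out) := by unfold Spec_get_all_docstring_indices; infer_instance

-- ===== CLAIM (what is proved, stated in full; the proofs are below) =====
def Claim_equal_get_all_docstring_indices : Prop := ∀ (lines : List String), Dom_get_all_docstring_indices lines → Spec_get_all_docstring_indices lines (get_all_docstring_indices lines)

-- ===== LEMMAS AND PROOFS =====

-- functional characterisation of the skip-blank scan over a suffix
def pvF : List String → Nat → Nat
  | [], p => p
  | l :: rest, p => if (PySem.Str.strip l).toList ≠ [] then p else pvF rest (p + 1)

-- functional characterisation of the quote search over a suffix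
def pvG (q : String) : List String → Nat → Nat
  | [], p => p
  | l :: rest, p => if PySem.Str.isIn q l then p else pvG q rest (p + 1)

theorem pvNextNonblank_headD (ls : List String) (p d : Nat) :
    (pvNextNonblank ls p).headD d = pvF ls p := by
  induction ls generalizing p d with
  | nil => rfl
  | cons l rest ih =>
    simp only [pvNextNonblank, pvF, List.headD_cons]
    rw [ih]

theorem pvNextNonblank_getD (ls : List String) (p k d : Nat) (hk : k ≤ ls.length) :
    (pvNextNonblank ls p).getD k d = pvF (ls.drop k) (p + k) := by
  induction ls generalizing p k with
  | nil =>
    have hk0 : k = 0 := by simpa using hk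
    subst hk0
    rfl
  | cons l rest ih =>
    cases k with
    | zero =>
      simp only [pvNextNonblank, List.getD_cons_zero, List.drop_zero, Nat.add_zero, pvF]
      rw [pvNextNonblank_headD]
    | succ k =>
      simp only [pvNextNonblank, List.getD_cons_succ, List.drop_succ_cons]
      rw [ih (p + 1) k (by simpa using hk)]
      congr 1
      omega

theorem pvNextQuote_headD (q : String) (ls : List String) (p d : Nat) :
    (pvNextQuote q ls p).headD d = pvG q ls p := by
  induction ls generalizing p d with
  | nil => rfl
  | cons l rest ih =>
    simp only [pvNextQuote, pvG, List.headD_cons]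
    rw [ih]

theorem pvNextQuote_getD (q : String) (ls : List String) (p k d : Nat) (hk : k ≤ ls.length) :
    (pvNextQuote q ls p).getD k d = pvG q (ls.drop k) (p + k) := by
  induction ls generalizing p k with
  | nil =>
    have hk0 : k = 0 := by simpa using hk
    subst hk0
    rfl
  | cons l rest ih =>
    cases k with
    | zero =>
      simp only [pvNextQuote, List.getD_cons_zero, List.drop_zero, Nat.add_zero, pvG]
      rw [pvNextQuote_headD]
    | succ k =>
      simp only [pvNextQuote, List.getD_cons_succ, List.drop_succ_cons]
      rw [ih (p + 1) k (by simpa using hk)]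
      congr 1
      omega

theorem pvSkipBlank_eq_F (lines : List String) (idx : Nat) :
    idx ≤ lines.length → pvSkipBlank lines idx = pvF (lines.drop idx) idx := by
  fun_induction pvSkipBlank lines idx with
  | case1 idx hlt hb ih =>
    intro hle
    rw [List.drop_eq_getElem_cons hlt]
    simp only [pvF]
    rw [if_neg (by simp [hb])]
    exact ih (by omega)
  | case2 idx hlt hb =>
    intro hle
    rw [List.drop_eq_getElem_cons hlt]
    simp only [pvF]
    rw [if_pos hb]
  | case3 idx hnlt =>
    intro hle
    rw [List.drop_eq_nil_of_le (by omega)]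
    rfl

theorem pvSkipBlank_le (lines : List String) (idx : Nat) :
    idx ≤ lines.length → pvSkipBlank lines idx ≤ lines.length := by
  fun_induction pvSkipBlank lines idx with
  | case1 idx hlt hb ih => intro _; exact ih (by omega)
  | case2 idx hlt hb => intro _; omega
  | case3 idx hnlt => intro hle; exact hle

theorem pvFindQuote_eq_G (lines : List String) (q : String) (idx : Nat) :
    idx ≤ lines.length →
    pvFindQuote lines q idx =
      if pvG q (lines.drop idx) idx < lines.length then some (pvG q (lines.drop idx) idx)
      else none := by
  fun_induction pvFindQuote lines q idx with
  | case1 idx hlt hq =>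
    intro hle
    rw [List.drop_eq_getElem_cons hlt]
    simp only [pvG]
    rw [if_pos hq, if_pos hlt]
  | case2 idx hlt hq ih =>
    intro hle
    rw [List.drop_eq_getElem_cons hlt]
    simp only [pvG]
    rw [if_neg hq]
    exact ih (by omega)
  | case3 idx hnlt =>
    intro hle
    rw [List.drop_eq_nil_of_le (by omega)]
    simp only [pvG]
    rw [if_neg (by omega)]

theorem pvG_congr (q q' : String) (h : q.toList = q'.toList) (ls : List String) (p : Nat) :
    pvG q ls p = pvG q' ls p := by
  induction ls generalizing p with
  | nil => rfl
  | cons l rest ih => simp [pvG, h, ih]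

-- the opening line's first three characters are exactly the quote it starts with
theorem pvQuote_toList (stripped q : String) (hq : q.toList.length = 3)
    (h : PySem.Str.startswith stripped q = true) :
    (PySem.Str.slice stripped none (some 3)).toList = q.toList := by
  have hpre : q.toList <+: stripped.toList := by
    rw [PySem.Str.startswith_eq] at h
    exact (PySem.Chars.startswith_iff _ _).mp h
  have htake : stripped.toList.take 3 = q.toList := by
    have h2 := List.prefix_iff_eq_take.mp hpre
    rw [hq] at h2
    exact h2.symm
  have hslice : PySem.List.slice stripped.toList none (some (3 : Int)) =
      stripped.toList.take ((3 : Int)).toNat := PySem.List.slice_to stripped.toList (by norm_num)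
  simp only [PySem.Str.toList_slice, PySem.Chars.slice_eq_listSlice]
  rw [hslice]
  simpa using htake

-- the per-line step of A's loop equals the per-line step of B's loop
theorem pvStep_eq (lines : List String) (k : Nat) (hk : k < lines.length)
    (acc : PySem.Set Int) :
    (match pvGetDocstringRange lines k with
      | some d => (PySem.List.pyRange (d.1 : Int) (d.2 : Int) 1).foldl PySem.Set.add acc
      | none => acc) =
    (let n := lines.length
     let j := (pvNextNonblank lines 0).getD (k + 1) n
     if j < n then
       let stripped := PySem.Str.strip (lines.getD j "")
       if PySem.Str.startswith stripped "\"\"\"" || PySem.Str.startswith stripped "'''" then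
         let quote := PySem.Str.slice stripped none (some 3)
         if PySem.Str.count stripped quote ≥ 2 ∧ PySem.Str.len stripped ≥ 6 then
           (PySem.List.pyRange (j : Int) ((j : Int) + 1) 1).foldl PySem.Set.add acc
         else
           let k' := (if PySem.Str.startswith stripped "\"\"\"" then pvNextQuote "\"\"\"" lines 0
                      else pvNextQuote "'''" lines 0).getD (j + 1) n
           if k' < n then
             (PySem.List.pyRange (j : Int) ((k' : Int) + 1) 1).foldl PySem.Set.add acc
           else acc
       else acc
     else acc) := by
  have hj : (pvNextNonblank lines 0).getD (k + 1) lines.length = pvSkipBlank lines (k + 1) := by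
    rw [pvNextNonblank_getD lines 0 (k + 1) lines.length (by omega), Nat.zero_add,
        ← pvSkipBlank_eq_F lines (k + 1) (by omega)]
  simp only [pvGetDocstringRange, ge_iff_le, hj]
  set J := pvSkipBlank lines (k + 1) with hJdef
  have hJle : J ≤ lines.length := pvSkipBlank_le lines (k + 1) (by omega)
  by_cases hJn : J < lines.length
  · rw [if_neg (by omega : ¬ lines.length ≤ J), if_pos hJn]
    by_cases hsw : (PySem.Str.startswith (PySem.Str.strip (lines.getD J "")) "\"\"\"" ||
        PySem.Str.startswith (PySem.Str.strip (lines.getD J "")) "'''") = true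
    · rw [if_pos hsw, if_pos hsw]
      by_cases hone : 2 ≤ PySem.Str.count (PySem.Str.strip (lines.getD J ""))
            (PySem.Str.slice (PySem.Str.strip (lines.getD J "")) none (some 3)) ∧
          6 ≤ PySem.Str.len (PySem.Str.strip (lines.getD J ""))
      · rw [if_pos hone, if_pos hone]
        push_cast
        rfl
      · rw [if_neg hone, if_neg hone]
        rw [pvFindQuote_eq_G lines
          (PySem.Str.slice (PySem.Str.strip (lines.getD J "")) none (some 3)) (J + 1) (by omega)]
        by_cases h3 : PySem.Str.startswith (PySem.Str.strip (lines.getD J "")) "\"\"\"" = true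
        · rw [if_pos h3]
          rw [pvG_congr _ _ (pvQuote_toList _ _ (by decide) h3) (lines.drop (J + 1)) (J + 1)]
          rw [pvNextQuote_getD "\"\"\"" lines 0 (J + 1) lines.length (by omega), Nat.zero_add]
          by_cases hG : pvG "\"\"\"" (lines.drop (J + 1)) (J + 1) < lines.length
          · rw [if_pos hG, if_pos hG]
            push_cast
            rfl
          · rw [if_neg hG, if_neg hG]
        · have h1 : PySem.Str.startswith (PySem.Str.strip (lines.getD J "")) "'''" = true := by
            cases hc : PySem.Str.startswith (PySem.Str.strip (lines.getD J "")) "'''"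
            · rw [hc] at hsw
              cases hc2 : PySem.Str.startswith (PySem.Str.strip (lines.getD J "")) "\"\"\""
              · rw [hc2] at hsw; simp at hsw
              · exact absurd hc2 h3
            · rfl
          rw [if_neg h3]
          rw [pvG_congr _ _ (pvQuote_toList _ _ (by decide) h1) (lines.drop (J + 1)) (J + 1)]
          rw [pvNextQuote_getD "'''" lines 0 (J + 1) lines.length (by omega), Nat.zero_add]
          by_cases hG : pvG "'''" (lines.drop (J + 1)) (J + 1) < lines.length
          · rw [if_pos hG, if_pos hG]
            push_cast
            rfl
          · rw [if_neg hG, if_neg hG]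
    · rw [if_neg hsw, if_neg hsw]
  · rw [if_pos (by omega : lines.length ≤ J), if_neg hJn]

-- ===== VERDICT (by name: the statement is the Claim_ definition above) =====
theorem get_all_docstring_indices_spec : Claim_equal_get_all_docstring_indices := by
  intro lines _
  unfold Spec_get_all_docstring_indices
  unfold get_all_docstring_indices get_all_docstring_indices_alt
  apply PySem.List.foldl_congr_mem
  intro acc p hp
  rcases (PySem.List.mem_enumerate_iff lines 0 p).mp hp with ⟨k, hk, rfl⟩
  have hfst : ((0 : Int) + (k : Int)).toNat = k := by omega
  by_cases hdef : (PySem.Str.startswith (PySem.Str.lstrip lines[k]) "def " ||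
      PySem.Str.startswith (PySem.Str.lstrip lines[k]) "class ") = true
  · simp only [hdef, if_pos, hfst]
    exact pvStep_eq lines k hk acc
  · simp only [hdef, if_neg, Bool.false_eq_true, not_false_iff, if_false]
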